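-- pv_equiv track=rewrite | github.com/AseefMohammed/document-assistant | src/document_processor.py | _determine_chunk_page
-- ===== SOURCE A (Python) =====
-- from typing import List, Dict, Any, Optional
--
-- def _determine_chunk_page(chunk: str, page_content_map: Dict[int, str]) -> int:
--     """
--     Determine which page a chunk primarily belongs to based on content overlap.
--
--     Args:
--         chunk: The text chunk
--         page_content_map: Dictionary mapping page numbers to page content
--
--     Returns:
--         Page number that has the highest overlap with the chunk
--     """
--     if not page_content_map:
--         return 1
--
--     max_overlap = 0
--     best_page = 1
--
--     # Clean the chunk for comparison (remove page markers)
--     clean_chunk = chunk.replace('\n--- Page', ' Page').replace('---\n', ' ')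
--
--     for page_num, page_content in page_content_map.items():
--         # Calculate overlap between chunk and page content
--         chunk_words = set(clean_chunk.lower().split())
--         page_words = set(page_content.lower().split())
--
--         overlap = len(chunk_words.intersection(page_words))
--
--         if overlap > max_overlap:
--             max_overlap = overlap
--             best_page = page_num
--
--     return best_page
-- ===== SOURCE B (Python) =====
-- def _determine_chunk_page(chunk: str, page_content_map: dict) -> int:
--     # Inverted index: fan chunk words out through word->pages index instead of
--     # intersecting chunk words with every page.
--     clean_chunk = chunk.replace('\n--- Page', ' Page').replace('---\n', ' ')
--     chunk_words = set(clean_chunk.lower().split())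
--
--     index = {}
--     for page_num, page_content in page_content_map.items():
--         for word in set(page_content.lower().split()):
--             index.setdefault(word, []).append(page_num)
--
--     counts = {}
--     for word in chunk_words:
--         for page_num in index.get(word, ()):
--             counts[page_num] = counts.get(page_num, 0) + 1
--
--     max_overlap = 0
--     best_page = 1
--     for page_num in page_content_map:
--         if counts.get(page_num, 0) > max_overlap:
--             max_overlap = counts.get(page_num, 0)
--             best_page = page_num
--     return best_page
-- ===== Notes on version B (the rewrite author's own statement) =====
-- stated objective: faster
-- what changed: Replaces A's per-page loop (which re-tokenizes the chunk and intersects word sets for every page) by a one-pass inverted word-to-pages index fanned out over the chunk's distinct words into a per-page counter, followed by the same strict-> argmax scan over the map in insertion order.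
import Mathlib
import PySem

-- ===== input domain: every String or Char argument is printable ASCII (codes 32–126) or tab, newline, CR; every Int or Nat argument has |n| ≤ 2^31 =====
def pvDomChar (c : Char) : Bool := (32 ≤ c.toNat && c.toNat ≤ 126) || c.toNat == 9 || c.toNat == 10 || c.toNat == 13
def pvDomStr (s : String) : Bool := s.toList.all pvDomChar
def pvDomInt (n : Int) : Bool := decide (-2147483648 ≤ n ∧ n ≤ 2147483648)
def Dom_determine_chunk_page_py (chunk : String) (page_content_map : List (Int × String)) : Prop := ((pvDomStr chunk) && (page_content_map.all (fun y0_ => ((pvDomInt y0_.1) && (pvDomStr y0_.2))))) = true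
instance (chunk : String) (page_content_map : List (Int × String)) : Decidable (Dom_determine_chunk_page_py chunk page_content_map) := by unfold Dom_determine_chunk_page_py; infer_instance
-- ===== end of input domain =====

-- B replaces A's per-page set intersections by an inverted word→pages index fanned out over the
-- chunk's distinct words (alternative decomposition; same tie-breaking via a final strict > scan).


-- ===== PORT A =====
-- clean_chunk = chunk.replace('\n--- Page', ' Page').replace('---\n', ' ')
def pvClean (chunk : String) : String :=
  PySem.Str.replace (PySem.Str.replace chunk "\n--- Page" " Page") "---\n" " "

-- set(s.lower().split())
def pvWords (s : String) : PySem.Set String :=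
  PySem.Set.ofList (PySem.Str.split₀ (PySem.Str.lower s))

def determine_chunk_page_py (chunk : String) (page_content_map : List (Int × String)) : Int :=
  if page_content_map = [] then 1
  else
    let clean_chunk := pvClean chunk
    -- for page_num, page_content in page_content_map.items(): …
    (page_content_map.foldl
      (fun (st : Int × Int) pc =>
        let chunk_words := pvWords clean_chunk
        let page_words := pvWords pc.2
        let overlap := PySem.Set.len (PySem.Set.inter chunk_words page_words)
        if overlap > st.1 then (overlap, pc.1) else st)
      (0, 1)).2

-- ===== PORT B =====
-- index = {}; for page_num, page_content in page_content_map.items():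
--   for word in set(page_content.lower().split()): index.setdefault(word, []).append(page_num)
def pvIndex (page_content_map : List (Int × String)) : PySem.Dict String (List Int) :=
  page_content_map.foldl
    (fun ix pc => (pvWords pc.2).foldl (fun ix w => ix.modify w [] (fun l => l ++ [pc.1])) ix)
    (PySem.Dict.empty : PySem.Dict String (List Int))

-- counts = {}; for word in chunk_words: for page_num in index.get(word, ()): counts[page_num] += 1
def pvCounts (chunk_words : List String) (ix : PySem.Dict String (List Int)) : PySem.Dict Int Int :=
  chunk_words.foldl
    (fun c w => (ix.getD w []).foldl (fun (d : PySem.Dict Int Int) p => d.modify p 0 (fun x => x + 1)) c)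
    (PySem.Dict.empty : PySem.Dict Int Int)

def determine_chunk_page_py_alt (chunk : String) (page_content_map : List (Int × String)) : Int :=
  let clean_chunk := pvClean chunk
  let chunk_words := pvWords clean_chunk
  let counts := pvCounts chunk_words (pvIndex page_content_map)
  -- for page_num in page_content_map: strict-> scan, default 1
  (page_content_map.foldl
    (fun (st : Int × Int) pc =>
      if counts.getD pc.1 0 > st.1 then (counts.getD pc.1 0, pc.1) else st)
    (0, 1)).2

-- ===== PRECONDITION & SPEC =====
-- Pre_ excludes association lists with duplicate page keys: A's parameter is a Python dict, which
-- cannot contain them, so such lists encode no input A is ever called on (B's merged counts would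
-- be the defensible reading there).
def Pre_determine_chunk_page_py (chunk : String) (page_content_map : List (Int × String)) : Prop :=
  (page_content_map.map Prod.fst).Nodup
instance (chunk : String) (page_content_map : List (Int × String)) : Decidable (Pre_determine_chunk_page_py chunk page_content_map) := by unfold Pre_determine_chunk_page_py; infer_instance

def pvWitness_determine_chunk_page_py : String × (List (Int × String)) :=
  ("alpha beta", [(1, "alpha gamma"), (2, "beta alpha x")])

def Spec_determine_chunk_page_py (chunk : String) (page_content_map : List (Int × String)) (out : Int) : Prop := out = determine_chunk_page_py_alt chunk page_content_map
instance (chunk : String) (page_content_map : List (Int × String)) (out : Int) : Decidable (Spec_determine_chunk_page_py chunk page_content_map out) := by unfold Spec_determine_chunk_page_py; infer_instance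

-- ===== CLAIM (what is proved, stated in full; the proofs are below) =====
def Claim_equal_determine_chunk_page_py : Prop := ∀ (chunk : String) (page_content_map : List (Int × String)), Dom_determine_chunk_page_py chunk page_content_map → Pre_determine_chunk_page_py chunk page_content_map → Spec_determine_chunk_page_py chunk page_content_map (determine_chunk_page_py chunk page_content_map)

-- ===== LEMMAS AND PROOFS =====

theorem pvWords_nodup (s : String) : (pvWords s).Nodup := by
  unfold pvWords; exact PySem.Set.nodup_ofList _

-- one page's word set, folded into the index, appends its page number to key w exactly when w is in it
theorem pvIndex_inner (p : Int) (w : String) :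
    ∀ (W : List String) (ix : PySem.Dict String (List Int)), W.Nodup →
    ((W.foldl (fun ix w' => ix.modify w' [] (fun l => l ++ [p])) ix).getD w [])
      = ix.getD w [] ++ (if w ∈ W then [p] else []) := by
  intro W
  induction W with
  | nil => intro ix _; simp
  | cons w' W' ih =>
    intro ix hnd
    rcases List.nodup_cons.mp hnd with ⟨hw', hnd'⟩
    simp only [List.foldl_cons]
    rw [ih _ hnd', PySem.Dict.getD_modify]
    by_cases h : w = w'
    · subst h; simp [hw']
    · simp [h, List.mem_cons]

-- the full index at key w lists, in order, the pages whose word set contains w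
theorem pvIndex_getD (w : String) :
    ∀ (pcm : List (Int × String)) (ix : PySem.Dict String (List Int)),
    ((pcm.foldl
        (fun ix pc => (pvWords pc.2).foldl (fun ix w' => ix.modify w' [] (fun l => l ++ [pc.1])) ix)
        ix).getD w [])
      = ix.getD w [] ++ (pcm.filter (fun pc => decide (w ∈ pvWords pc.2))).map Prod.fst := by
  intro pcm
  induction pcm with
  | nil => intro ix; simp
  | cons pc rest ih =>
    intro ix
    simp only [List.foldl_cons]
    rw [ih, pvIndex_inner pc.1 w (pvWords pc.2) ix (pvWords_nodup pc.2)]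
    by_cases h : w ∈ pvWords pc.2 <;> simp [h]

-- with distinct keys, exactly the entry (p, c) itself can satisfy a key-p predicate
theorem pv_countP_key (p : Int) (c : String) (Q : String → Bool) :
    ∀ (pcm : List (Int × String)), (pcm.map Prod.fst).Nodup → (p, c) ∈ pcm →
    (pcm.countP (fun pc => decide (pc.1 = p) && Q pc.2)) = (if Q c then 1 else 0) := by
  intro pcm
  induction pcm with
  | nil => intro _ h; simp at h
  | cons pc rest ih =>
    intro hnd hmem
    rw [List.map_cons] at hnd
    rcases List.nodup_cons.mp hnd with ⟨hk, hnd'⟩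
    rcases List.mem_cons.mp hmem with h | h
    · -- head is (p, c); no later entry has key p
      have hz : rest.countP (fun pc => decide (pc.1 = p) && Q pc.2) = 0 := by
        rw [List.countP_eq_zero]
        intro a ha hpa
        apply hk
        have ha1 : a.1 = p := by
          by_contra hne
          simp [hne] at hpa
        rw [← h]
        have hmm := List.mem_map_of_mem (f := Prod.fst) ha
        rw [ha1] at hmm
        simpa using hmm
      rw [List.countP_cons, hz, ← h]
      simp
    · -- head has a different key
      have hne : pc.1 ≠ p := by
        intro he
        apply hk
        have : (p, c).1 ∈ rest.map Prod.fst := List.mem_map_of_mem h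
        exact he ▸ this
      rw [List.countP_cons, ih hnd' h]
      simp [hne]

-- counts.getD p 0 counts the occurrences of p fanned out through the index
theorem pvCounts_getD (cw : List String) (ix : PySem.Dict String (List Int)) (p : Int) :
    (pvCounts cw ix).getD p 0
      = ((cw.flatMap (fun w => ix.getD w [])).count p : Int) := by
  unfold pvCounts
  rw [← List.foldl_flatMap]
  simpa using PySem.Dict.getD_foldl_modify_add_one
    (cw.flatMap (fun w => ix.getD w [])) (PySem.Dict.empty : PySem.Dict Int Int) p

-- for an entry (p, c) of a duplicate-free map, B's count at p is A's intersection size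
theorem pv_count_eq_overlap (cw : List String) (pcm : List (Int × String)) (p : Int) (c : String)
    (hnd : (pcm.map Prod.fst).Nodup) (hmem : (p, c) ∈ pcm) :
    (pvCounts cw (pvIndex pcm)).getD p 0
      = PySem.Set.len (PySem.Set.inter cw (pvWords c)) := by
  rw [pvCounts_getD]
  have hone : ∀ w : String,
      (((pvIndex pcm).getD w []).count p) = (if w ∈ pvWords c then 1 else 0) := by
    intro w
    unfold pvIndex
    rw [pvIndex_getD w pcm (PySem.Dict.empty : PySem.Dict String (List Int))]
    have hnilD : ((PySem.Dict.empty : PySem.Dict String (List Int)).getD w []) = [] := rfl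
    rw [hnilD, List.nil_append, List.count_eq_countP, List.countP_map]
    have hcong : ∀ pc ∈ pcm.filter (fun pc => decide (w ∈ pvWords pc.2)),
        (((fun x => x == p) ∘ Prod.fst) pc = true) ↔
        ((fun pc : Int × String => decide (pc.1 = p)) pc = true) := by
      intro pc _; simp [Function.comp]
    rw [List.countP_congr hcong, List.countP_filter]
    have hcong2 : ∀ pc ∈ pcm,
        ((fun pc : Int × String => decide (pc.1 = p) && decide (w ∈ pvWords pc.2)) pc = true) ↔
        ((fun pc : Int × String => decide (pc.1 = p) && (fun s => decide (w ∈ pvWords s)) pc.2) pc = true) := by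
      intro pc _; rfl
    rw [List.countP_congr hcong2, pv_countP_key p c (fun s => decide (w ∈ pvWords s)) pcm hnd hmem]
    simp
  have hcnt : (cw.flatMap (fun w => (pvIndex pcm).getD w [])).count p
      = cw.countP (fun w => decide (w ∈ pvWords c)) := by
    induction cw with
    | nil => simp
    | cons w ws ih =>
      rw [List.flatMap_cons, List.count_append, ih, List.countP_cons, hone w]
      by_cases h : w ∈ pvWords c <;> simp [h] <;> omega
  have hfilt : cw.filter (fun w => decide (w ∈ pvWords c))
      = cw.filter (fun x => (pvWords c).contains x) :=
    List.filter_congr (fun w _ => by simp [PySem.Set.contains])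
  rw [hcnt]
  simp only [PySem.Set.len, PySem.Set.inter, List.countP_eq_length_filter, hfilt]

-- ===== VERDICT (by name: the statement is the Claim_ definition above) =====
theorem determine_chunk_page_py_spec : Claim_equal_determine_chunk_page_py := by
  intro chunk pcm _ hpre
  unfold Spec_determine_chunk_page_py determine_chunk_page_py determine_chunk_page_py_alt
  by_cases hnil : pcm = []
  · subst hnil; simp [pvCounts]
  · simp only [if_neg hnil]
    have h := PySem.List.foldl_congr_mem pcm
      (fun (st : Int × Int) pc =>
        if PySem.Set.len (PySem.Set.inter (pvWords (pvClean chunk)) (pvWords pc.2)) > st.1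
        then (PySem.Set.len (PySem.Set.inter (pvWords (pvClean chunk)) (pvWords pc.2)), pc.1) else st)
      (fun (st : Int × Int) pc =>
        if (pvCounts (pvWords (pvClean chunk)) (pvIndex pcm)).getD pc.1 0 > st.1
        then ((pvCounts (pvWords (pvClean chunk)) (pvIndex pcm)).getD pc.1 0, pc.1) else st)
      (0, 1)
      (by
        intro acc pc hmem
        beta_reduce
        rw [pv_count_eq_overlap (pvWords (pvClean chunk)) pcm pc.1 pc.2 hpre (by simpa using hmem)])
    exact congrArg Prod.snd h
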